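-- pv_equiv track=rewrite | github.com/KasselFelix/Python-Programming_element | TME8/TME8.py | encadrements3
-- ===== SOURCE A (Python) =====
-- def encadrements3(n):
--     """
--     int -> List[tuple(int,int,int)]
--     Hypothèse : n est un entier.+
--
--     """
--
--     #L:List[tuple(int,int,int)]
--     L=[]
--
--     #cpt:int
--     cpt=0
--
--     for i in range(1,n+1):
--         for j in range(1,n+1):
--             for k in range(1,n+1):
--                 cpt=cpt+1
--                 if i<=j<=k:
--                     L.append((i,j,k))
--
--     return L
-- ===== SOURCE B (Python) =====
-- def encadrements3(n):
--     # Direct triangular enumeration: start j at i and k at j, so the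
--     # i<=j<=k filter over the full n^3 cube disappears.
--     return [(i, j, k)
--             for i in range(1, n + 1)
--             for j in range(i, n + 1)
--             for k in range(j, n + 1)]
-- ===== Notes on version B (the rewrite author's own statement) =====
-- stated objective: alternative
-- what changed: Replaces A's full n^3 cube scan with an i<=j<=k filter (plus an unused counter) by a triangular comprehension that starts j at i and k at j, enumerating exactly the kept triples in the same order.
import Mathlib
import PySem

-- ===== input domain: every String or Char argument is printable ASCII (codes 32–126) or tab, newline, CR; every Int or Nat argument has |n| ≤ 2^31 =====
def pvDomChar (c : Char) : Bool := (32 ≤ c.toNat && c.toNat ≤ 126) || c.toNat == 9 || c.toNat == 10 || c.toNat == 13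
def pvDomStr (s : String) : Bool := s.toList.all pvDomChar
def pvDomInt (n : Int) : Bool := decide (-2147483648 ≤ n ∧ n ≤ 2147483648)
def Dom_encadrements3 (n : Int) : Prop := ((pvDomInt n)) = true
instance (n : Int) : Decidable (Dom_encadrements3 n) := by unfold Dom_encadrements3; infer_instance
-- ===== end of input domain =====

-- B replaces A's full-cube scan with an i<=j<=k filter (and an unused counter) by a triangular enumeration (j from i, k from j), same triples in the same order.


-- ===== PORT A =====
-- literal port: state is the pair (L, cpt); cpt is incremented on every innermost iteration
def encadrements3 (n : Int) : List (Int × Int × Int) :=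
  let st : List (Int × Int × Int) × Int :=
    (PySem.List.pyRange 1 (n+1) 1).foldl (fun st i =>
      (PySem.List.pyRange 1 (n+1) 1).foldl (fun st j =>
        (PySem.List.pyRange 1 (n+1) 1).foldl (fun st k =>
          if i ≤ j ∧ j ≤ k then (st.1 ++ [(i, j, k)], st.2 + 1) else (st.1, st.2 + 1))
        st) st) ([], 0)
  st.1

-- ===== PORT B =====
def encadrements3_alt (n : Int) : List (Int × Int × Int) :=
  (PySem.List.pyRange 1 (n+1) 1).flatMap (fun i =>
    (PySem.List.pyRange i (n+1) 1).flatMap (fun j =>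
      (PySem.List.pyRange j (n+1) 1).map (fun k => (i, j, k))))

-- ===== PRECONDITION & SPEC =====
def Spec_encadrements3 (n : Int) (out : List (Int × Int × Int)) : Prop := out = encadrements3_alt n
instance (n : Int) (out : List (Int × Int × Int)) : Decidable (Spec_encadrements3 n out) := by unfold Spec_encadrements3; infer_instance

-- ===== CLAIM (what is proved, stated in full; the proofs are below) =====
def Claim_equal_encadrements3 : Prop := ∀ (n : Int), Dom_encadrements3 n → Spec_encadrements3 n (encadrements3 n)

-- ===== LEMMAS AND PROOFS =====

-- filtering a unit-step range by a lower bound a >= lo is the range starting at a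
theorem pyRange_filter_ge (a b : Int) :
    ∀ (N : Nat) (lo : Int), (b - lo).toNat = N → lo ≤ a →
    (PySem.List.pyRange lo b 1).filter (fun x => decide (a ≤ x)) = PySem.List.pyRange a b 1 := by
  intro N
  induction N with
  | zero =>
    intro lo hN h
    have hb : b ≤ lo := by omega
    rw [PySem.List.pyRange_one_eq_nil hb, PySem.List.pyRange_one_eq_nil (hb.trans h)]
    rfl
  | succ N ih =>
    intro lo hN h
    have hlt : lo < b := by omega
    rw [PySem.List.pyRange_one_cons hlt]
    rcases eq_or_lt_of_le h with rfl | hlo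
    · rw [PySem.List.pyRange_one_cons hlt]
      simp only [List.filter_cons, decide_eq_true_eq, le_refl, if_pos]
      congr 1
      apply List.filter_eq_self.mpr
      intro x hx
      have := (PySem.List.mem_pyRange_one).mp hx
      simp only [decide_eq_true_eq]; omega
    · simp only [List.filter_cons, decide_eq_true_eq]
      rw [if_neg (by omega)]
      exact ih (lo + 1) (by omega) (by omega)

theorem flatMap_congr_mem {α β : Type} (l : List α) (f g : α → List β)
    (h : ∀ x ∈ l, f x = g x) : l.flatMap f = l.flatMap g := by
  induction l with
  | nil => rfl
  | cons x xs ih =>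
    simp only [List.flatMap_cons, h x (by simp), ih (fun y hy => h y (by simp [hy]))]

theorem flatMap_ite_nil {α β : Type} (l : List α) (p : α → Prop) [DecidablePred p] (g : α → List β) :
    l.flatMap (fun x => if p x then g x else []) = (l.filter (fun x => decide (p x))).flatMap g := by
  induction l with
  | nil => rfl
  | cons x xs ih =>
    by_cases hx : p x <;> simp [List.flatMap_cons, hx, ih]

-- a pair-state fold whose first component ignores the second projects to a fold on the first component
theorem fst_foldl {α σ τ : Type} (F : σ × τ → α → σ × τ) (f : σ → α → σ)
    (hf : ∀ st x, (F st x).1 = f st.1 x) :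
    ∀ (l : List α) (st : σ × τ), (l.foldl F st).1 = l.foldl f st.1 := by
  intro l
  induction l with
  | nil => intro st; rfl
  | cons x xs ih => intro st; simp only [List.foldl_cons, ih, hf]

-- ===== VERDICT (by name: the statement is the Claim_ definition above) =====
theorem encadrements3_spec : Claim_equal_encadrements3 := by
  intro n _
  show encadrements3 n = encadrements3_alt n
  unfold encadrements3 encadrements3_alt
  set R := PySem.List.pyRange 1 (n+1) 1 with hR
  -- drop the cpt component of the state
  rw [show (([] : List (Int × Int × Int)), (0 : Int)) = ((([] : List (Int × Int × Int)), (0 : Int)) : _) from rfl]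
  rw [fst_foldl _ (fun L i => R.foldl (fun L j => R.foldl
        (fun L k => if i ≤ j ∧ j ≤ k then L ++ [(i, j, k)] else L) L) L)
      (by
        intro st i
        exact fst_foldl _ _ (fun st j =>
          fst_foldl _ _ (fun st k => by split_ifs <;> rfl) R st) R st)]
  -- inner fold is an append-if loop, middle/outer are extend loops
  have hinner : ∀ (i j : Int) (L : List (Int × Int × Int)),
      R.foldl (fun L k => if i ≤ j ∧ j ≤ k then L ++ [(i, j, k)] else L) L
        = L ++ (R.filter (fun k => decide (i ≤ j ∧ j ≤ k))).map (fun k => (i, j, k)) := by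
    intro i j L
    exact PySem.List.foldl_append_ite (p := fun k => i ≤ j ∧ j ≤ k) (f := fun k => (i, j, k)) R L
  simp only [hinner]
  simp only [PySem.List.foldl_append_eq_flatMap]
  simp only [List.nil_append]
  apply flatMap_congr_mem
  intro i hi
  have hi1 : 1 ≤ i := ((PySem.List.mem_pyRange_one).mp hi).1
  have hmid : ∀ j ∈ R,
      (R.filter (fun k => decide (i ≤ j ∧ j ≤ k))).map (fun k => ((i, j, k) : Int × Int × Int))
        = if i ≤ j then (PySem.List.pyRange j (n+1) 1).map (fun k => (i, j, k)) else [] := by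
    intro j hj
    have hj1 : 1 ≤ j := ((PySem.List.mem_pyRange_one).mp hj).1
    by_cases hij : i ≤ j
    · rw [if_pos hij]
      congr 1
      rw [List.filter_congr (q := fun k => decide (j ≤ k)) (fun k _ => by
        rw [decide_eq_decide]
        exact ⟨fun h => h.2, fun h => ⟨hij, h⟩⟩)]
      exact pyRange_filter_ge j (n+1) ((n + 1 - 1).toNat) 1 rfl hj1
    · rw [if_neg hij]
      rw [List.filter_eq_nil_iff.mpr (fun k _ => by simp only [decide_eq_true_eq]; tauto)]
      rfl
  rw [flatMap_congr_mem R _ _ hmid, flatMap_ite_nil,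
      pyRange_filter_ge i (n+1) ((n + 1 - 1).toNat) 1 rfl hi1]
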